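-- pv_equiv track=rewrite | github.com/tHollarek/advent_of_code | source/days/day4.py | sum_unmarked
-- ===== SOURCE A (Python) =====
-- def sum_unmarked(board, game):
--     board_list = []
--     for row in board:
--         board_list = board_list + row
--     for number in game:
--         if number in board_list:
--             board_list.remove(number)
--     unmarked_sum = sum(board_list)
--     return unmarked_sum
-- ===== SOURCE B (Python) =====
-- def sum_unmarked(board, game):
--     cnt = {}
--     for row in board:
--         for x in row:
--             cnt[x] = cnt.get(x, 0) + 1
--     gcnt = {}
--     for x in game:
--         gcnt[x] = gcnt.get(x, 0) + 1
--     total = 0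
--     for n, c in cnt.items():
--         total += n * max(0, c - gcnt.get(n, 0))
--     return total
-- ===== Notes on version B (the rewrite author's own statement) =====
-- stated objective: faster
-- what changed: A's per-call linear scan-and-remove over the flattened board is replaced by building two frequency tables (board cells and called numbers) once and summing n * max(0, board_count - game_count) over the board table, a multiset difference with no removal loop.
import Mathlib
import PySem

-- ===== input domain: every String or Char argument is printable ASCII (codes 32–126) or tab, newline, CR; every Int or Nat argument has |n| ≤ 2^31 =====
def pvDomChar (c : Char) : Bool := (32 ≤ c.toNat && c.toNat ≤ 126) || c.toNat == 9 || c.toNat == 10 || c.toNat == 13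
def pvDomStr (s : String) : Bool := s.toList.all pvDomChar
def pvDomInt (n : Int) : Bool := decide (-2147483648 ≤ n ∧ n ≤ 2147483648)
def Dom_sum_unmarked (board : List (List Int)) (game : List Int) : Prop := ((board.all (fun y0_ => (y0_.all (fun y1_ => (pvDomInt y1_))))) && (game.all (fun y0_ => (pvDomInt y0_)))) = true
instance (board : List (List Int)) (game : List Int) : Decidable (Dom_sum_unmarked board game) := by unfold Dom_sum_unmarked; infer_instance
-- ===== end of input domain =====

-- B replaces A's quadratic remove-per-call loop by two frequency tables and a multiset-difference
-- weighted sum (idiomatic Counter-style rewrite); return value only, no mutation involved.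

-- ===== PORT A =====
def sum_unmarked (board : List (List Int)) (game : List Int) : Int :=
  -- board_list = []; for row in board: board_list = board_list + row
  let board_list := board.foldl (fun acc row => acc ++ row) []
  -- for number in game: if number in board_list: board_list.remove(number)
  let board_list := game.foldl (fun bl number =>
    if bl.contains number then (PySem.List.remove? bl number).getD bl else bl) board_list
  board_list.sum

-- ===== PORT B =====
def sum_unmarked_alt (board : List (List Int)) (game : List Int) : Int :=
  -- cnt = {}; for row in board: for x in row: cnt[x] = cnt.get(x, 0) + 1
  let cnt := board.foldl (fun d row => row.foldl (fun d x => d.insert x (d.getD x 0 + 1)) d)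
    (PySem.Dict.empty : PySem.Dict Int Int)
  -- gcnt = {}; for x in game: gcnt[x] = gcnt.get(x, 0) + 1
  let gcnt := game.foldl (fun d x => d.insert x (d.getD x 0 + 1)) (PySem.Dict.empty : PySem.Dict Int Int)
  -- total = 0; for n, c in cnt.items(): total += n * max(0, c - gcnt.get(n, 0))
  cnt.items.foldl (fun total p => total + p.1 * max 0 (p.2 - gcnt.getD p.1 0)) 0

-- ===== PRECONDITION & SPEC =====
def Spec_sum_unmarked (board : List (List Int)) (game : List Int) (out : Int) : Prop := out = sum_unmarked_alt board game
instance (board : List (List Int)) (game : List Int) (out : Int) : Decidable (Spec_sum_unmarked board game out) := by unfold Spec_sum_unmarked; infer_instance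

-- ===== CLAIM (what is proved, stated in full; the proofs are below) =====
def Claim_equal_sum_unmarked : Prop := ∀ (board : List (List Int)) (game : List Int), Dom_sum_unmarked board game → Spec_sum_unmarked board game (sum_unmarked board game)

-- ===== LEMMAS AND PROOFS =====

-- A's removal loop, named for the proofs below
def pvLoop (bl : List Int) (game : List Int) : List Int :=
  game.foldl (fun bl number =>
    if bl.contains number then (PySem.List.remove? bl number).getD bl else bl) bl

lemma pvLoop_mem (game : List Int) (bl : List Int) (x : Int) (h : x ∈ pvLoop bl game) : x ∈ bl := by
  induction game generalizing bl with
  | nil => simpa [pvLoop] using h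
  | cons g gs ih =>
    have h1 : x ∈ (if bl.contains g then (PySem.List.remove? bl g).getD bl else bl) :=
      ih _ (by simpa [pvLoop] using h)
    by_cases hg : g ∈ bl
    · rw [if_pos (by simpa using hg), PySem.List.remove?_eq_some_erase bl g hg,
        Option.getD_some] at h1
      exact List.mem_of_mem_erase h1
    · rwa [if_neg (by simpa using hg)] at h1

lemma pvLoop_count (game : List Int) (bl : List Int) (n : Int) :
    (pvLoop bl game).count n = bl.count n - min (bl.count n) (game.count n) := by
  induction game generalizing bl with
  | nil => simp [pvLoop]
  | cons g gs ih =>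
    have step : pvLoop bl (g :: gs)
        = pvLoop (if bl.contains g then (PySem.List.remove? bl g).getD bl else bl) gs := by
      simp [pvLoop, List.foldl_cons]
    rw [step]
    by_cases hg : g ∈ bl
    · rw [if_pos (by simpa using hg), PySem.List.remove?_eq_some_erase bl g hg,
        Option.getD_some, ih]
      by_cases hn : n = g
      · subst hn
        have h1 : (bl.erase n).count n = bl.count n - 1 := List.count_erase_self
        have hpos : 1 ≤ bl.count n := List.one_le_count_iff.mpr hg
        rw [h1, List.count_cons_self]
        omega
      · have h1 : (bl.erase g).count n = bl.count n := List.count_erase_of_ne hn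
        rw [h1, List.count_cons_of_ne (Ne.symm hn)]
    · rw [if_neg (by simpa using hg), ih]
      by_cases hn : n = g
      · subst hn
        have h0 : bl.count n = 0 := by simpa [List.count_eq_zero] using hg
        rw [List.count_cons_self]
        omega
      · rw [List.count_cons_of_ne (Ne.symm hn)]

lemma sum_map_ite (x : Int) (S : List Int) (hnd : S.Nodup) (hx : x ∈ S) :
    (S.map (fun k => if k = x then (x : Int) else 0)).sum = x := by
  induction S with
  | nil => simp at hx
  | cons a as ih =>
    rcases List.mem_cons.mp hx with h | h
    · subst h
      have hz : (as.map (fun k => if k = x then (x : Int) else 0)).sum = 0 := by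
        apply List.sum_eq_zero
        intro y hy
        rcases List.mem_map.mp hy with ⟨k, hk, rfl⟩
        have : k ≠ x := fun he => (List.nodup_cons.mp hnd).1 (he ▸ hk)
        simp [this]
      simp [List.map_cons, List.sum_cons, hz]
    · have hne : a ≠ x := fun he => (List.nodup_cons.mp hnd).1 (he ▸ h)
      rw [List.map_cons, List.sum_cons, if_neg hne, ih (List.nodup_cons.mp hnd).2 h]
      ring

-- sum of a list as a weighted sum over any nodup list of values covering its elements
lemma sum_eq_weighted (l S : List Int) (hnd : S.Nodup) (hcov : ∀ x ∈ l, x ∈ S) :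
    l.sum = (S.map (fun k => k * (l.count k : Int))).sum := by
  induction l with
  | nil => simp
  | cons x t ih =>
    have hx : x ∈ S := hcov x (List.mem_cons_self)
    have ih' := ih (fun y hy => hcov y (List.mem_cons_of_mem _ hy))
    have hsplit : (S.map (fun k => k * ((x :: t).count k : Int))).sum
        = (S.map (fun k => k * (t.count k : Int))).sum
          + (S.map (fun k => if k = x then x else 0)).sum := by
      rw [← List.sum_map_add]
      apply congrArg
      apply List.map_congr_left
      intro k _
      by_cases hk : k = x
      · subst hk
        rw [List.count_cons_self, if_pos rfl]
        push_cast
        ring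
      · rw [List.count_cons_of_ne (by simpa using fun h => hk h.symm)]
        simp [hk]
    have hone := sum_map_ite x S hnd hx
    rw [List.sum_cons, ih', hsplit, hone]
    ring

lemma cnt_eq_counter (board : List (List Int)) :
    board.foldl (fun d row => row.foldl (fun d x => d.insert x (d.getD x 0 + 1)) d)
      (PySem.Dict.empty : PySem.Dict Int Int) = PySem.Dict.counter board.flatten := by
  rw [← PySem.Dict.foldl_insert_getD_add_one_eq_counter, ← List.foldl_flatten]

lemma flatten_eq (board : List (List Int)) :
    board.foldl (fun acc row => acc ++ row) [] = board.flatten := by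
  simpa using PySem.List.foldl_append_eq_flatten board []

-- ===== VERDICT (by name: the statement is the Claim_ definition above) =====
theorem sum_unmarked_spec : Claim_equal_sum_unmarked := by
  intro board game _
  unfold Spec_sum_unmarked sum_unmarked sum_unmarked_alt
  simp only [cnt_eq_counter, PySem.Dict.foldl_insert_getD_add_one_eq_counter,
    PySem.Dict.items_counter, flatten_eq, PySem.List.foldl_add]
  set F := board.flatten with hF
  rw [show (game.foldl (fun bl number =>
        if bl.contains number then (PySem.List.remove? bl number).getD bl else bl) F)
      = pvLoop F game from rfl]
  rw [sum_eq_weighted (pvLoop F game) (PySem.Set.ofList F) (PySem.Set.nodup_ofList F)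
    (fun x hx => (PySem.Set.mem_ofList F x).mpr (pvLoop_mem game F x hx))]
  rw [List.map_map]
  simp only [zero_add]
  apply congrArg
  apply List.map_congr_left
  intro k _
  simp only [Function.comp]
  rw [pvLoop_count, PySem.Dict.getD_counter]
  have key : ∀ a b : Nat, ((a - min a b : Nat) : Int) = max 0 ((a : Int) - (b : Int)) := by
    intro a b
    rcases Nat.le_total a b with h | h
    · rw [min_eq_left h]
      have : max 0 ((a : Int) - (b : Int)) = 0 := by rw [max_eq_left]; omega
      rw [this]; omega
    · rw [min_eq_right h]
      have : max 0 ((a : Int) - (b : Int)) = (a : Int) - b := by rw [max_eq_right]; omega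
      rw [this]; push_cast [h]; ring
  rw [key]
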